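-- pv_equiv track=rewrite | github.com/ipriyam26/Bennett3rdYearLabs | Compititive Programing/lab2_week2/nse.py | smallest_element
-- ===== SOURCE A (Python) =====
-- def smallest_element(arr):
--     n = len(arr)
--     stack = []
--     res = [0] * n
--     for i in range(n - 1, -1, -1):
--         while stack and arr[i] <= arr[stack[-1]]:
--             stack.pop()
--         res[i] = arr[i] - arr[stack[-1]] if stack else 1000000000
--         stack.append(i)
--     return res
-- ===== SOURCE B (Python) =====
-- def smallest_element(arr):
--     n = len(arr)
--     res = []
--     for i in range(n):
--         d = 1000000000
--         for j in range(i + 1, n):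
--             if arr[j] < arr[i]:
--                 d = arr[i] - arr[j]
--                 break
--         res.append(d)
--     return res
-- ===== Notes on version B (the rewrite author's own statement) =====
-- stated objective: simpler
-- what changed: Replaced the right-to-left monotonic index stack with a direct forward scan: for each i, res[i] is arr[i] minus the first strictly smaller element to its right, else 1000000000.
import Mathlib
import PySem

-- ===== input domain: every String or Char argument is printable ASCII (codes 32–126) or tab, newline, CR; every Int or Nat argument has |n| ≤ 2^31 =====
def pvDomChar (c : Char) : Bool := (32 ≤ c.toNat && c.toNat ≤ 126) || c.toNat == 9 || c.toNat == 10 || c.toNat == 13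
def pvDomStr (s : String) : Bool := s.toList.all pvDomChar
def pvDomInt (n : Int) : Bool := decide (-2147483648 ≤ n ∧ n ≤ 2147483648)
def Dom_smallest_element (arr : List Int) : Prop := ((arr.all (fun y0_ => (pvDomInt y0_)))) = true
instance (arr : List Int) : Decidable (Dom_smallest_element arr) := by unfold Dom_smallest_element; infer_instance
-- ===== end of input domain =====

-- B replaces A's right-to-left monotonic index stack by a direct forward scan for the
-- first strictly smaller element to the right (simpler; not faster).

-- ===== PORT A =====
-- the 'while stack and arr[i] <= arr[stack[-1]]: stack.pop()' loop (stack head = Python stack top)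
def popA (arr : List Int) (x : Int) : List Int → List Int
  | [] => []
  | t :: rest =>
    if x ≤ PySem.List.pyGetD arr t 0 then popA arr x rest else t :: rest

-- one iteration of the 'for i in range(n-1, -1, -1)' loop body; state = (res, stack)
def stepA (arr : List Int) (acc : List Int × List Int) (i : Int) : List Int × List Int :=
  let st := popA arr (PySem.List.pyGetD arr i 0) acc.2
  let v : Int :=
    match st with
    | [] => 1000000000
    | t :: _ => PySem.List.pyGetD arr i 0 - PySem.List.pyGetD arr t 0
  (acc.1.set i.toNat v, i :: st)

-- n = len(arr) is inlined as arr.length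
def smallest_element (arr : List Int) : List Int :=
  ((PySem.List.pyRange ((arr.length : Int) - 1) (-1) (-1)).foldl (stepA arr)
    (List.replicate arr.length (0 : Int), [])).1

-- ===== PORT B =====
-- the inner 'for j in range(i+1, n)' scan, over the suffix to the right of i
def firstSmallerDiff (x : Int) : List Int → Int
  | [] => 1000000000
  | y :: rest => if y < x then x - y else firstSmallerDiff x rest

def smallest_element_alt : List Int → List Int
  | [] => []
  | x :: rest => firstSmallerDiff x rest :: smallest_element_alt rest

-- ===== PRECONDITION & SPEC =====
def Spec_smallest_element (arr : List Int) (out : List Int) : Prop := out = smallest_element_alt arr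
instance (arr : List Int) (out : List Int) : Decidable (Spec_smallest_element arr out) := by unfold Spec_smallest_element; infer_instance

-- ===== CLAIM (what is proved, stated in full; the proofs are below) =====
def Claim_equal_smallest_element : Prop := ∀ (arr : List Int), Dom_smallest_element arr → Spec_smallest_element arr (smallest_element arr)

-- ===== LEMMAS AND PROOFS =====

-- value-level model of the pop loop
def dropGE (x : Int) : List Int → List Int
  | [] => []
  | v :: rest => if x ≤ v then dropGE x rest else v :: rest

-- value-level model of A's whole loop on a suffix: (result list, stack of values)
def modelA : List Int → List Int × List Int
  | [] => ([], [])
  | x :: rest =>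
    let p := modelA rest
    let st' := dropGE x p.2
    ((match st' with | [] => (1000000000 : Int) | v :: _ => x - v) :: p.1, x :: st')

theorem popA_map (arr : List Int) (x : Int) (st : List Int) :
    (popA arr x st).map (fun t => PySem.List.pyGetD arr t 0)
      = dropGE x (st.map (fun t => PySem.List.pyGetD arr t 0)) := by
  induction st with
  | nil => rfl
  | cons t rest ih =>
    simp only [popA, dropGE, List.map_cons]
    split_ifs
    · simp [ih]
    · simp

theorem dropGE_dropGE (x y : Int) (l : List Int) (h : x ≤ y) :
    dropGE x (dropGE y l) = dropGE x l := by
  induction l with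
  | nil => rfl
  | cons v rest ih =>
    simp only [dropGE]
    split_ifs with h1 h2 <;> simp_all [dropGE] <;> omega

theorem modelA_stack_head (rest : List Int) (x : Int) :
    (dropGE x (modelA rest).2).head? = rest.find? (fun y => decide (y < x)) := by
  induction rest generalizing x with
  | nil => rfl
  | cons y t ih =>
    simp only [modelA, List.find?]
    by_cases h : x ≤ y
    · have : (decide (y < x)) = false := by simp; omega
      rw [this]
      simp only [dropGE, if_pos h, dropGE_dropGE x y _ h]
      exact ih x
    · have hy : y < x := by omega
      simp only [dropGE, if_neg h]
      simp [hy]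

theorem firstSmallerDiff_eq_find (x : Int) (rest : List Int) :
    firstSmallerDiff x rest
      = match rest.find? (fun y => decide (y < x)) with
        | none => (1000000000 : Int)
        | some v => x - v := by
  induction rest with
  | nil => rfl
  | cons y t ih =>
    simp only [firstSmallerDiff, List.find?]
    by_cases h : y < x <;> simp [h, ih]

theorem modelA_fst (l : List Int) : (modelA l).1 = smallest_element_alt l := by
  induction l with
  | nil => rfl
  | cons x rest ih =>
    simp only [modelA, smallest_element_alt, ih, List.cons.injEq, and_true]
    rw [firstSmallerDiff_eq_find]
    have h := modelA_stack_head rest x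
    cases hd : dropGE x (modelA rest).2 with
    | nil => rw [hd] at h; simp at h; rw [← h]
    | cons v tl => rw [hd] at h; simp at h; rw [← h]

-- prepend a fresh slot to the result list: set at index k on (replicate (k+1) 0 ++ tl)
theorem replicate_set (k : Nat) (v : Int) (tl : List Int) :
    (List.replicate (k + 1) (0 : Int) ++ tl).set k v
      = List.replicate k (0 : Int) ++ v :: tl := by
  induction k with
  | zero => rfl
  | succ m ih =>
    simpa [List.replicate_succ] using ih

-- main invariant: folding A's step over indices k, k+1, …, n-1 (foldr form) computes
-- modelA of the suffix 'arr.drop k', with the index stack mapping to the value stack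
theorem inv_main (arr : List Int) :
    ∀ (m k : Nat), k + m = arr.length →
    ∃ st : List Int,
      List.foldr (fun i acc => stepA arr acc i)
          (List.replicate arr.length (0 : Int), [])
          ((List.range' k m).map (Nat.cast : Nat → Int))
        = (List.replicate k (0 : Int) ++ (modelA (arr.drop k)).1, st)
      ∧ st.map (fun t => PySem.List.pyGetD arr t 0) = (modelA (arr.drop k)).2 := by
  intro m
  induction m with
  | zero =>
    intro k hk
    have hnil : arr.drop k = [] := by
      apply List.drop_eq_nil_of_le; omega
    refine ⟨[], ?_, ?_⟩
    · simp [hnil, modelA, ← hk]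
    · simp [hnil, modelA]
  | succ m ih =>
    intro k hk
    obtain ⟨st, hfold, hmap⟩ := ih (k + 1) (by omega)
    have hk' : k < arr.length := by omega
    refine ⟨(k : Int) :: popA arr (PySem.List.pyGetD arr (k : Int) 0) st, ?_, ?_⟩
    · rw [List.range'_succ, List.map_cons, List.foldr_cons, hfold]
      simp only [stepA]
      have hdrop : arr.drop k = arr[k] :: arr.drop (k + 1) := by
        rw [List.drop_eq_getElem_cons hk']
      have hget : PySem.List.pyGetD arr (k : Int) 0 = arr[k] := by
        rw [PySem.List.pyGetD_natCast]
        exact List.getD_eq_getElem arr 0 hk'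
      have htoNat : ((k : Int)).toNat = k := Int.toNat_natCast k
      rw [htoNat, replicate_set]
      congr 1
      rw [hdrop]
      simp only [modelA]
      -- heads: the written value equals modelA's head
      have hpm := popA_map arr (PySem.List.pyGetD arr (k : Int) 0) st
      rw [hmap, hget] at hpm
      cases hp : popA arr (PySem.List.pyGetD arr (k : Int) 0) st with
      | nil =>
        rw [hget] at hp
        rw [hp, List.map_nil] at hpm
        rw [← hpm]
      | cons t tl =>
        rw [hget] at hp
        rw [hp] at hpm
        cases hd : dropGE arr[k] (modelA (arr.drop (k + 1))).2 with
        | nil => rw [hd] at hpm; simp at hpm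
        | cons v vt =>
          rw [hd] at hpm
          simp only [List.map_cons, List.cons.injEq] at hpm
          simp [hget, hpm.1]
    · have hdrop : arr.drop k = arr[k] :: arr.drop (k + 1) := by
        rw [List.drop_eq_getElem_cons hk']
      have hget : PySem.List.pyGetD arr (k : Int) 0 = arr[k] := by
        rw [PySem.List.pyGetD_natCast]
        exact List.getD_eq_getElem arr 0 hk'
      rw [hdrop]
      simp only [modelA, List.map_cons]
      rw [popA_map, hmap, hget]

theorem smallest_element_eq_model (arr : List Int) :
    smallest_element arr = (modelA arr).1 := by
  unfold smallest_element
  have h1 : PySem.List.pyRange ((arr.length : Int) - 1) (-1) (-1)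
      = (PySem.List.pyRange 0 (arr.length : Int) 1).reverse := by
    have := PySem.List.pyRange_neg_one_eq_reverse ((arr.length : Int) - 1) (-1)
    simpa using this
  have h2 : PySem.List.pyRange 0 (arr.length : Int) 1
      = (List.range' 0 arr.length).map (Nat.cast : Nat → Int) := by
    rw [PySem.List.pyRange_one]
    simp [List.range_eq_range']
  show ((PySem.List.pyRange ((arr.length : Int) - 1) (-1) (-1)).foldl (stepA arr)
    (List.replicate arr.length (0 : Int), [])).1 = (modelA arr).1
  rw [h1, h2, List.foldl_reverse]
  obtain ⟨st, hfold, -⟩ := inv_main arr arr.length 0 (by omega)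
  rw [hfold]
  simp

-- ===== VERDICT (by name: the statement is the Claim_ definition above) =====
theorem smallest_element_spec : Claim_equal_smallest_element := by
  intro arr _
  unfold Spec_smallest_element
  rw [smallest_element_eq_model, modelA_fst]
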